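-- pv_equiv track=rewrite | github.com/DefenderGB/scripts | bufferoverflow.py | pattern_create
-- ===== SOURCE A (Python) =====
-- def default_sets():
--     return [
--         [chr(ord('A') + i) for i in range(26)],
--         [chr(ord('a') + i) for i in range(26)],
--         [chr(ord('0') + i) for i in range(10)],
--     ]
--
-- def __create(length, sets):
--     i = [0, 0, 0]
--     l = 0
--     while True:
--         for o in range(len(sets)):
--             yield sets[o][i[o]]
--         l += len(sets)
--         if l >= length:
--             break
--         o = -1
--         i[o] += 1
--         while i[o] == len(sets[o]):
--             i[o] = 0
--             i[o - 1] += 1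
--             o -= 1
--
-- def mult(ls):
--     p = 0
--     for i in ls:
--         p = (i * (1 if not p else p))
--     return p
--
-- def pattern_create(length=-1, sets=None):
--     if not sets:
--         sets = default_sets()
--     assert(3 == len(sets))
--     limit = mult([len(sets[i]) for i in range(len(sets))] + [len(sets)])
--     if 0 > length:
--         length = limit
--     assert(limit >= length)
--     return ''.join(__create(length, sets))[:length]
-- ===== SOURCE B (Python) =====
-- def pattern_create(length=-1, sets=None):
--     if not sets:
--         sets = [[chr(c) for c in range(65, 91)],
--                 [chr(c) for c in range(97, 123)],
--                 [chr(c) for c in range(48, 58)]]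
--     assert 3 == len(sets)
--     s0, s1, s2 = sets
--     limit = 3 * len(s0) * len(s1) * len(s2)
--     if length < 0:
--         length = limit
--     assert limit >= length
--     full = ''.join(x + y + z for x in s0 for y in s1 for z in s2)
--     return full[:length]
-- ===== Notes on version B (the rewrite author's own statement) =====
-- stated objective: idiomatic
-- what changed: Replaces the hand-rolled infinite generator with an explicit 3-digit odometer and manual carry loop by directly enumerating the Cartesian product sets[0] x sets[1] x sets[2] as a comprehension, joining it and slicing to length.
-- outside the precondition, e.g. on pattern_create(6, [['a', 'b'], ['x'], ['', 'y']]): A returns 'axaxy', B returns 'axaxyb'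
-- crash fix: On sets of exactly 3 alphabets at least one of which is the empty list, with length <= 0, A raises IndexError from its generator while B returns ''. — e.g. on pattern_create(0, some [[], ["a"], ["b"]]): A raises IndexError, B returns ""
import Mathlib
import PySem

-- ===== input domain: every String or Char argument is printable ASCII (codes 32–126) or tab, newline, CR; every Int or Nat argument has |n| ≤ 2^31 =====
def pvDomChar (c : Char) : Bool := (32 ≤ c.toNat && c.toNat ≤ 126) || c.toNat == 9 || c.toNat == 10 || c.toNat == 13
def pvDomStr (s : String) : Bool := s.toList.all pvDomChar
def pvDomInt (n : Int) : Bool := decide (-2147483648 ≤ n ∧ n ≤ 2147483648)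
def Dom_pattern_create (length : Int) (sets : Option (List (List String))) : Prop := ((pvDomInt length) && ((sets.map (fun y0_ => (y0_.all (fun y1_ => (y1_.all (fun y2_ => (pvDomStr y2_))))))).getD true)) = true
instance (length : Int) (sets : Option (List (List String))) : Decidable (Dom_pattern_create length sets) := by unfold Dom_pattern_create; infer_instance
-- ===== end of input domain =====

-- B replaces A's odometer generator with manual carry by a direct Cartesian-product
-- enumeration joined and sliced (idiomatic; not claimed faster). Pre_ excludes inputs
-- where A raises and sets containing the empty string (see Pre_'s comment).

-- ===== PORT A =====
-- default_sets()
def pcDefaultSets : List (List String) :=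
  [ (List.range 26).map (fun i => String.ofList [Char.ofNat ('A'.toNat + i)]),
    (List.range 26).map (fun i => String.ofList [Char.ofNat ('a'.toNat + i)]),
    (List.range 10).map (fun i => String.ofList [Char.ofNat ('0'.toNat + i)]) ]

-- mult(ls)
def pcMult (ls : List Int) : Int :=
  ls.foldl (fun p i => i * (if p = 0 then 1 else p)) 0

-- one pass of 'for o in range(len(sets)): yield sets[o][i[o]]' (none = IndexError)
def pcEmit (sets : List (List String)) (i : List Int) : Option (List String) :=
  (PySem.List.pyRange 0 sets.length 1).foldl
    (fun acc o => acc.bind (fun l =>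
      ((PySem.List.pyGet? sets o).bind (fun s =>
        (PySem.List.pyGet? i o).bind (fun iv => PySem.List.pyGet? s iv))).map
        (fun x => l ++ [x])))
    (some [])

-- i[o] = v  (none = IndexError)
def pcSet (xs : List Int) (o : Int) (v : Int) : Option (List Int) :=
  (PySem.List.pyIdx? xs.length o).map (fun n => xs.set n v)

-- i[o] += d : read then write (none = IndexError)
def pcIncr (xs : List Int) (o : Int) (d : Int) : Option (List Int) :=
  (PySem.List.pyGet? xs o).bind (fun cur => pcSet xs o (cur + d))

-- 'while i[o] == len(sets[o]): i[o] = 0; i[o-1] += 1; o -= 1' (fuel for totality; none = IndexError)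
def pcCarry (sets : List (List String)) : List Int → Int → Nat → Option (List Int)
  | _, _, 0 => none
  | i, o, fuel + 1 =>
    match PySem.List.pyGet? i o, PySem.List.pyGet? sets o with
    | some iv, some so =>
      if iv = (so.length : Int) then
        (pcSet i o 0).bind (fun i1 =>
          (pcIncr i1 (o - 1) 1).bind (fun i2 => pcCarry sets i2 (o - 1) fuel))
      else some i
    | _, _ => none

-- the 'while True' body of __create, consumed by ''.join (fuel for totality; none = IndexError)
def pcLoop (sets : List (List String)) (length : Int) : List Int → Int → List String → Nat → Option (List String)
  | _, _, _, 0 => none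
  | i, l, acc, fuel + 1 =>
    (pcEmit sets i).bind (fun em =>
      let acc' := acc ++ em
      let l' := l + (sets.length : Int)
      if length ≤ l' then some acc'
      else
        (pcIncr i (-1) 1).bind (fun i1 =>
          (pcCarry sets i1 (-1) (i1.length + 1)).bind (fun i2 =>
            pcLoop sets length i2 l' acc' fuel)))

-- 'if not sets: sets = default_sets()'
def pcResolve (sets? : Option (List (List String))) : List (List String) :=
  match sets? with
  | none => pcDefaultSets
  | some [] => pcDefaultSets
  | some s => s

-- body of pattern_create after the default-sets line ('' on assert failure / IndexError, outside Pre_)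
def pcMain (length : Int) (sets : List (List String)) : String :=
  if sets.length = 3 then
    let limit := pcMult (((PySem.List.pyRange 0 sets.length 1).map
      (fun idx => ((PySem.List.pyGetD sets idx []).length : Int))) ++ [(sets.length : Int)])
    let len := if 0 > length then limit else length
    if len ≤ limit then
      (pcLoop sets len [0, 0, 0] 0 [] (len.toNat + 1)).elim ""
        (fun parts => PySem.Str.slice (PySem.Str.join "" parts) none (some len))
    else ""
  else ""

def pattern_create (length : Int) (sets : Option (List (List String))) : String :=
  pcMain length (pcResolve sets)

-- ===== PORT B =====
-- B's inline default sets: [[chr(c) for c in range(65,91)], …]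
def pbDefaultSets : List (List String) :=
  [ (PySem.List.pyRange 65 91 1).map (fun c => String.ofList [Char.ofNat c.toNat]),
    (PySem.List.pyRange 97 123 1).map (fun c => String.ofList [Char.ofNat c.toNat]),
    (PySem.List.pyRange 48 58 1).map (fun c => String.ofList [Char.ofNat c.toNat]) ]

def pbResolve (sets? : Option (List (List String))) : List (List String) :=
  match sets? with
  | none => pbDefaultSets
  | some [] => pbDefaultSets
  | some s => s

-- body of B's pattern_create after the default-sets line ('' on assert failure, outside Pre_)
def pbMain (length : Int) (sets : List (List String)) : String :=
  match sets with
  | [s0, s1, s2] =>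
    let limit : Int := 3 * (s0.length : Int) * (s1.length : Int) * (s2.length : Int)
    let len := if length < 0 then limit else length
    if len ≤ limit then
      let full := PySem.Str.join ""
        (s0.flatMap (fun x => s1.flatMap (fun y => s2.map (fun z => x ++ y ++ z))))
      PySem.Str.slice full none (some len)
    else ""
  | _ => ""

def pattern_create_alt (length : Int) (sets : Option (List (List String))) : String :=
  pbMain length (pbResolve sets)

-- ===== PRECONDITION & SPEC =====
-- Pre_ requires the (effective) sets argument to have exactly 3 non-empty alphabets (otherwise A
-- raises AssertionError or IndexError) and length ≤ 3·|s0|·|s1|·|s2| (otherwise AssertionError).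
-- It also excludes sets containing the empty string, on which A still returns: there 'length' is
-- ambiguous (A counts yielded tokens, B counts characters) and both truncations are defensible.
def Pre_pattern_create (length : Int) (sets : Option (List (List String))) : Prop :=
  if sets = none ∨ sets = some [] then length < 0 ∨ length ≤ 20280
  else (sets.getD []).length = 3 ∧ (∀ t ∈ sets.getD [], t ≠ [] ∧ ∀ x ∈ t, x ≠ "") ∧
      (length < 0 ∨ length ≤ 3 * (((sets.getD []).map List.length).prod : Int))

instance (length : Int) (sets : Option (List (List String))) : Decidable (Pre_pattern_create length sets) := by
  unfold Pre_pattern_create; infer_instance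

def pvWitness_pattern_create : Int × Option (List (List String)) := (-1, none)

-- On sets of exactly 3 alphabets at least one of which is the empty list, with length ≤ 0,
-- A raises IndexError from its generator while B returns ''.
def Raises_pattern_create (length : Int) (sets : Option (List (List String))) : Prop :=
  if sets = none then False
  else (sets.getD []).length = 3 ∧ (∃ t ∈ sets.getD [], t = []) ∧ length ≤ 0

instance (length : Int) (sets : Option (List (List String))) : Decidable (Raises_pattern_create length sets) := by
  unfold Raises_pattern_create; infer_instance

def pvRaiseWitness_pattern_create : Int × Option (List (List String)) := (0, some [[], ["a"], ["b"]])
def pvRaiseWitnessOut_pattern_create : String := ""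

def Spec_pattern_create (length : Int) (sets : Option (List (List String))) (out : String) : Prop :=
  out = pattern_create_alt length sets
instance (length : Int) (sets : Option (List (List String))) (out : String) : Decidable (Spec_pattern_create length sets out) := by
  unfold Spec_pattern_create; infer_instance

-- ===== CLAIM (what is proved, stated in full; the proofs are below) =====
def Claim_equal_pattern_create : Prop := ∀ (length : Int) (sets : Option (List (List String))), Dom_pattern_create length sets → Pre_pattern_create length sets → Spec_pattern_create length sets (pattern_create length sets)

def Claim_raises_pattern_create : Prop := (∀ (length : Int) (sets : Option (List (List String))), Dom_pattern_create length sets → Raises_pattern_create length sets → ¬ Pre_pattern_create length sets) ∧ (Dom_pattern_create (pvRaiseWitness_pattern_create.1) (pvRaiseWitness_pattern_create.2) ∧ Raises_pattern_create (pvRaiseWitness_pattern_create.1) (pvRaiseWitness_pattern_create.2) ∧ pattern_create_alt (pvRaiseWitness_pattern_create.1) (pvRaiseWitness_pattern_create.2) = pvRaiseWitnessOut_pattern_create)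

-- ===== LEMMAS AND PROOFS =====

-- the odometer successor on (a, b, c)
def pcNext (n1 n2 : Nat) : Nat × Nat × Nat → Nat × Nat × Nat
  | (a, b, c) =>
    if c + 1 < n2 then (a, b, c + 1)
    else if b + 1 < n1 then (a, b + 1, 0) else (a + 1, 0, 0)

-- the strings A's generator emits: m triples starting at state (a, b, c)
def pcStream (s0 s1 s2 : List String) : Nat × Nat × Nat → Nat → List String
  | _, 0 => []
  | (a, b, c), m + 1 =>
    s0.getD a "" :: s1.getD b "" :: s2.getD c "" ::
      pcStream s0 s1 s2 (pcNext s1.length s2.length (a, b, c)) m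

-- the product enumeration from state (a, b, c) to the end, 3 strings per triple
def pcSuffix (s0 s1 s2 : List String) (a b c : Nat) : List String :=
  ((s2.drop c).flatMap (fun z => [s0.getD a "", s1.getD b "", z])) ++
  ((s1.drop (b + 1)).flatMap (fun y => s2.flatMap (fun z => [s0.getD a "", y, z]))) ++
  ((s0.drop (a + 1)).flatMap (fun x => s1.flatMap (fun y => s2.flatMap (fun z => [x, y, z]))))

theorem pcEmit_eq (s0 s1 s2 : List String) (a b c : Nat)
    (ha : a < s0.length) (hb : b < s1.length) (hc : c < s2.length) :
    pcEmit [s0, s1, s2] [(a : Int), (b : Int), (c : Int)] =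
      some [s0.getD a "", s1.getD b "", s2.getD c ""] := by
  have hr : PySem.List.pyRange 0 ([s0, s1, s2].length : Int) 1 = [0, 1, 2] := by
    simp; decide
  simp only [pcEmit, hr, List.foldl_cons, List.foldl_nil]
  simp [PySem.List.pyGet?, PySem.List.pyIdx?, ha, hb, hc]

theorem pcCarry_c (s0 s1 s2 : List String) (a b c : Nat) (hc : c + 1 < s2.length) :
    pcCarry [s0, s1, s2] [(a : Int), (b : Int), ((c : Int) + 1)] (-1) 4 =
      some [(a : Int), (b : Int), ((c : Int) + 1)] := by
  have h : ((c : Int) + 1) ≠ (s2.length : Int) := by exact_mod_cast Nat.ne_of_lt hc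
  simp [pcCarry, PySem.List.pyGet?, PySem.List.pyIdx?, h]

theorem pcCarry_b (s0 s1 s2 : List String) (a b c : Nat)
    (hc : c + 1 = s2.length) (hb : b + 1 < s1.length) :
    pcCarry [s0, s1, s2] [(a : Int), (b : Int), ((c : Int) + 1)] (-1) 4 =
      some [(a : Int), ((b : Int) + 1), 0] := by
  have h1 : ((c : Int) + 1) = (s2.length : Int) := by exact_mod_cast hc
  have h2 : ((b : Int) + 1) ≠ (s1.length : Int) := by exact_mod_cast Nat.ne_of_lt hb
  simp [pcCarry, pcIncr, pcSet, PySem.List.pyGet?, PySem.List.pyIdx?, h1, h2]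

theorem pcCarry_a (s0 s1 s2 : List String) (a b c : Nat)
    (hc : c + 1 = s2.length) (hb : b + 1 = s1.length) (ha : a + 1 < s0.length) :
    pcCarry [s0, s1, s2] [(a : Int), (b : Int), ((c : Int) + 1)] (-1) 4 =
      some [((a : Int) + 1), 0, 0] := by
  have h1 : ((c : Int) + 1) = (s2.length : Int) := by exact_mod_cast hc
  have h2 : ((b : Int) + 1) = (s1.length : Int) := by exact_mod_cast hb
  have h3 : ((a : Int) + 1) ≠ (s0.length : Int) := by exact_mod_cast Nat.ne_of_lt ha
  simp [pcCarry, pcIncr, pcSet, PySem.List.pyGet?, PySem.List.pyIdx?, h1, h2, h3]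

theorem pcIncr_last (a b c : Int) : pcIncr [a, b, c] (-1) 1 = some [a, b, c + 1] := by
  simp [pcIncr, pcSet, PySem.List.pyGet?, PySem.List.pyIdx?]

-- generic: head decomposition of pcSuffix at an in-range state
theorem pcSuffix_head (s0 s1 s2 : List String) (a b c : Nat)
    (hc : c < s2.length) :
    [s0.getD a "", s1.getD b "", s2.getD c ""] <+: pcSuffix s0 s1 s2 a b c := by
  unfold pcSuffix
  rw [List.drop_eq_getElem_cons hc, List.getD_eq_getElem s2 "" hc]
  simp only [List.flatMap_cons, List.cons_append, List.append_assoc, List.cons_prefix_cons,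
    List.nil_prefix, and_self]

theorem pcSuffix_unfold_c (s0 s1 s2 : List String) (a b c : Nat) (hc : c + 1 < s2.length) :
    pcSuffix s0 s1 s2 a b c =
      s0.getD a "" :: s1.getD b "" :: s2.getD c "" :: pcSuffix s0 s1 s2 a b (c + 1) := by
  unfold pcSuffix
  rw [List.drop_eq_getElem_cons (show c < s2.length by omega),
      List.getD_eq_getElem s2 "" (show c < s2.length by omega)]
  simp only [List.flatMap_cons, List.cons_append, List.append_assoc, List.nil_append]

theorem pcSuffix_unfold_b (s0 s1 s2 : List String) (a b c : Nat)
    (hc : c + 1 = s2.length) (hb : b + 1 < s1.length) :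
    pcSuffix s0 s1 s2 a b c =
      s0.getD a "" :: s1.getD b "" :: s2.getD c "" :: pcSuffix s0 s1 s2 a (b + 1) 0 := by
  unfold pcSuffix
  rw [List.drop_eq_getElem_cons (show c < s2.length by omega),
      List.getD_eq_getElem s2 "" (show c < s2.length by omega),
      show c + 1 = s2.length from hc, List.drop_length,
      List.drop_eq_getElem_cons hb, List.getD_eq_getElem s1 "" (show b + 1 < s1.length from hb)]
  simp only [List.flatMap_cons, List.flatMap_nil, List.cons_append, List.nil_append,
    List.append_assoc, List.drop_zero, List.append_nil]

theorem pcRowSplit (x : String) (s1 s2 : List String) (hn1 : 0 < s1.length) :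
    s1.flatMap (fun y => s2.flatMap (fun z => [x, y, z])) =
      s2.flatMap (fun z => [x, s1[0], z]) ++
        (s1.drop 1).flatMap (fun y => s2.flatMap (fun z => [x, y, z])) := by
  conv_lhs => rw [show s1 = s1[0] :: s1.drop 1 from by simpa using List.drop_eq_getElem_cons hn1]
  simp only [List.flatMap_cons]

theorem pcSuffix_unfold_a (s0 s1 s2 : List String) (a b c : Nat)
    (hc : c + 1 = s2.length) (hb : b + 1 = s1.length) (ha : a + 1 < s0.length) :
    pcSuffix s0 s1 s2 a b c =
      s0.getD a "" :: s1.getD b "" :: s2.getD c "" :: pcSuffix s0 s1 s2 (a + 1) 0 0 := by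
  have hn1 : 0 < s1.length := by omega
  unfold pcSuffix
  rw [List.drop_eq_getElem_cons (show c < s2.length by omega),
      List.getD_eq_getElem s2 "" (show c < s2.length by omega),
      show c + 1 = s2.length from hc, List.drop_length,
      show b + 1 = s1.length from hb, List.drop_length,
      List.drop_eq_getElem_cons ha, List.getD_eq_getElem s0 "" (show a + 1 < s0.length from ha),
      List.getD_eq_getElem s1 "" hn1, List.drop_zero]
  simp only [List.flatMap_cons, List.flatMap_nil, List.cons_append, List.nil_append,
    List.append_assoc, List.append_nil]
  rw [pcRowSplit s0[a + 1] s1 s2 hn1]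
  simp only [List.append_assoc, show (0 + 1 : Nat) = 1 from rfl]

-- every element of pcSuffix at an in-range state comes from one of the three alphabets
theorem pcSuffix_mem (s0 s1 s2 : List String) (a b c : Nat)
    (ha : a < s0.length) (hb : b < s1.length) (x : String)
    (hx : x ∈ pcSuffix s0 s1 s2 a b c) : x ∈ s0 ∨ x ∈ s1 ∨ x ∈ s2 := by
  unfold pcSuffix at hx
  rw [List.getD_eq_getElem s0 "" ha, List.getD_eq_getElem s1 "" hb] at hx
  simp only [List.mem_append, List.mem_flatMap, List.mem_cons, List.not_mem_nil, or_false] at hx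
  rcases hx with (⟨z, hz, rfl | rfl | rfl⟩ | ⟨y, hy, z, hz, rfl | rfl | rfl⟩) | ⟨u, hu, y, hy, z, hz, rfl | rfl | rfl⟩ <;>
    first
      | exact Or.inl (List.getElem_mem ha)
      | exact Or.inl (List.mem_of_mem_drop hu)
      | exact Or.inr (Or.inl (List.getElem_mem hb))
      | exact Or.inr (Or.inl (List.mem_of_mem_drop hy))
      | exact Or.inr (Or.inl hy)
      | exact Or.inr (Or.inr (List.mem_of_mem_drop hz))
      | exact Or.inr (Or.inr hz)

-- the loop invariant: A's generator produces some prefix of the product enumeration,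
-- with at least `len` counted tokens
theorem pcLoop_spec (s0 s1 s2 : List String) (len : Int) :
    ∀ (f : Nat) (a b c : Nat) (l : Int) (acc : List String),
      a < s0.length → b < s1.length → c < s2.length →
      len ≤ l + 3 + 3 * (((s0.length : Int) - 1 - a) * ((s1.length : Int) * (s2.length : Int))
          + ((s1.length : Int) - 1 - b) * (s2.length : Int) + ((s2.length : Int) - 1 - c)) →
      1 ≤ f → len ≤ l + 3 * (f : Int) →
      ∃ m : Nat, pcLoop [s0, s1, s2] len [(a : Int), (b : Int), (c : Int)] l acc f =
          some (acc ++ pcStream s0 s1 s2 (a, b, c) m) ∧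
        len ≤ l + 3 * (m : Int) ∧
        pcStream s0 s1 s2 (a, b, c) m <+: pcSuffix s0 s1 s2 a b c := by
  intro f
  induction f with
  | zero => intro a b c l acc _ _ _ _ hf _; omega
  | succ f ih =>
    intro a b c l acc ha hb hc hlen _ hfuel
    rw [pcLoop, pcEmit_eq s0 s1 s2 a b c ha hb hc, Option.bind_some]
    have h3 : ((List.length [s0, s1, s2] : Nat) : Int) = 3 := by norm_num
    simp only [h3]
    by_cases hstop : len ≤ l + 3
    · rw [if_pos hstop]
      refine ⟨1, by simp [pcStream], by push_cast; omega, ?_⟩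
      simpa [pcStream] using pcSuffix_head s0 s1 s2 a b c hc
    · rw [if_neg hstop, pcIncr_last, Option.bind_some]
      have hstop' : l + 3 < len := by omega
      have hf1 : 1 ≤ f := by push_cast at hfuel; omega
      have hfuel' : len ≤ (l + 3) + 3 * (f : Int) := by push_cast at hfuel ⊢; omega
      have h4 : [(a : Int), (b : Int), ((c : Int) + 1)].length + 1 = 4 := by simp
      rw [h4]
      by_cases hC : c + 1 < s2.length
      · rw [pcCarry_c s0 s1 s2 a b c hC, Option.bind_some,
            show ((c : Int) + 1) = ((c + 1 : Nat) : Int) by push_cast; ring]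
        have hlen' : len ≤ (l + 3) + 3 + 3 * (((s0.length : Int) - 1 - a) * ((s1.length : Int) * (s2.length : Int))
            + ((s1.length : Int) - 1 - b) * (s2.length : Int) + ((s2.length : Int) - 1 - (c + 1 : Nat))) := by
          push_cast at hlen ⊢; linarith
        obtain ⟨m, heq, hm, hpre⟩ := ih a b (c + 1) (l + 3) (acc ++ [s0.getD a "", s1.getD b "", s2.getD c ""]) ha hb hC hlen' hf1 hfuel'
        refine ⟨m + 1, ?_, by push_cast at hm ⊢; omega, ?_⟩
        · rw [heq]
          simp [pcStream, pcNext, hC]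
        · rw [pcSuffix_unfold_c s0 s1 s2 a b c hC]
          simp only [pcStream, pcNext, hC, if_pos, List.cons_prefix_cons, true_and]
          exact hpre
      · have hceq : c + 1 = s2.length := by omega
        by_cases hB : b + 1 < s1.length
        · rw [pcCarry_b s0 s1 s2 a b c hceq hB, Option.bind_some,
              show ((b : Int) + 1) = ((b + 1 : Nat) : Int) by push_cast; ring,
              show (0 : Int) = ((0 : Nat) : Int) by norm_num]
          have h2 : (s2.length : Int) = (c : Int) + 1 := by exact_mod_cast hceq.symm
          have hlen' : len ≤ (l + 3) + 3 + 3 * (((s0.length : Int) - 1 - a) * ((s1.length : Int) * (s2.length : Int))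
              + ((s1.length : Int) - 1 - (b + 1 : Nat)) * (s2.length : Int) + ((s2.length : Int) - 1 - (0 : Nat))) := by
            have hkey : ((s1.length : Int) - 1 - ((b : Int) + 1)) * (s2.length : Int) + ((s2.length : Int) - 1 - 0)
                = ((s1.length : Int) - 1 - b) * (s2.length : Int) + ((s2.length : Int) - 1 - c) - 1 := by
              rw [h2]; ring
            push_cast at hlen ⊢; linarith [hkey]
          obtain ⟨m, heq, hm, hpre⟩ := ih a (b + 1) 0 (l + 3) (acc ++ [s0.getD a "", s1.getD b "", s2.getD c ""]) ha hB (by omega) hlen' hf1 hfuel'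
          refine ⟨m + 1, ?_, by push_cast at hm ⊢; omega, ?_⟩
          · rw [heq]
            simp [pcStream, pcNext, hC, hB]
          · rw [pcSuffix_unfold_b s0 s1 s2 a b c hceq hB]
            simp only [pcStream, pcNext, hC, hB, if_pos, ite_false,
              List.cons_prefix_cons, true_and]
            exact hpre
        · have hbeq : b + 1 = s1.length := by omega
          by_cases hA : a + 1 < s0.length
          · rw [pcCarry_a s0 s1 s2 a b c hceq hbeq hA, Option.bind_some,
                show ((a : Int) + 1) = ((a + 1 : Nat) : Int) by push_cast; ring,
                show (0 : Int) = ((0 : Nat) : Int) by norm_num]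
            have h2 : (s2.length : Int) = (c : Int) + 1 := by exact_mod_cast hceq.symm
            have h1 : (s1.length : Int) = (b : Int) + 1 := by exact_mod_cast hbeq.symm
            have hlen' : len ≤ (l + 3) + 3 + 3 * (((s0.length : Int) - 1 - (a + 1 : Nat)) * ((s1.length : Int) * (s2.length : Int))
                + ((s1.length : Int) - 1 - (0 : Nat)) * (s2.length : Int) + ((s2.length : Int) - 1 - (0 : Nat))) := by
              have hkey : ((s0.length : Int) - 1 - ((a : Int) + 1)) * ((s1.length : Int) * (s2.length : Int))
                  + ((s1.length : Int) - 1 - 0) * (s2.length : Int) + ((s2.length : Int) - 1 - 0)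
                  = ((s0.length : Int) - 1 - a) * ((s1.length : Int) * (s2.length : Int))
                  + ((s1.length : Int) - 1 - b) * (s2.length : Int) + ((s2.length : Int) - 1 - c) - 1 := by
                rw [h2, h1]; ring
              push_cast at hlen ⊢; linarith [hkey]
            obtain ⟨m, heq, hm, hpre⟩ := ih (a + 1) 0 0 (l + 3) (acc ++ [s0.getD a "", s1.getD b "", s2.getD c ""]) hA (by omega) (by omega) hlen' hf1 hfuel'
            refine ⟨m + 1, ?_, by push_cast at hm ⊢; omega, ?_⟩
            · rw [heq]
              simp [pcStream, pcNext, hC, hB]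
            · rw [pcSuffix_unfold_a s0 s1 s2 a b c hceq hbeq hA]
              simp only [pcStream, pcNext, hC, hB, ite_false,
                List.cons_prefix_cons, true_and]
              exact hpre
          · exfalso
            have haeq : a + 1 = s0.length := by omega
            have h0 : (s0.length : Int) = (a : Int) + 1 := by exact_mod_cast haeq.symm
            have h1 : (s1.length : Int) = (b : Int) + 1 := by exact_mod_cast hbeq.symm
            have h2 : (s2.length : Int) = (c : Int) + 1 := by exact_mod_cast hceq.symm
            rw [h0, h1, h2] at hlen
            have : len ≤ l + 3 := by nlinarith [hlen]
            omega

theorem pcStream_length (s0 s1 s2 : List String) :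
    ∀ (m : Nat) (st : Nat × Nat × Nat), (pcStream s0 s1 s2 st m).length = 3 * m := by
  intro m
  induction m with
  | zero => intro st; rfl
  | succ m ih =>
    intro st
    obtain ⟨a, b, c⟩ := st
    simp only [pcStream, List.length_cons, ih]
    omega

theorem pcSuffix_zero (s0 s1 s2 : List String)
    (h0 : 0 < s0.length) (h1 : 0 < s1.length) :
    pcSuffix s0 s1 s2 0 0 0 =
      s0.flatMap (fun x => s1.flatMap (fun y => s2.flatMap (fun z => [x, y, z]))) := by
  conv_rhs => rw [show s0 = s0[0] :: s0.drop 1 from by simpa using List.drop_eq_getElem_cons h0]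
  rw [List.flatMap_cons, pcRowSplit s0[0] s1 s2 h1]
  unfold pcSuffix
  rw [List.getD_eq_getElem s0 "" h0, List.getD_eq_getElem s1 "" h1, List.drop_zero]

theorem pcFlattenMapFlatMap {α : Type} (l : List α) (f : α → List String) :
    ((l.flatMap f).map String.toList).flatten =
      l.flatMap (fun x => ((f x).map String.toList).flatten) := by
  induction l with
  | nil => simp
  | cons h t ih => simp [List.flatMap_cons, ih]

theorem pcCharsEq (s0 s1 s2 : List String) :
    ((s0.flatMap (fun x => s1.flatMap (fun y => s2.flatMap (fun z => [x, y, z])))).map String.toList).flatten =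
      ((s0.flatMap (fun x => s1.flatMap (fun y => s2.map (fun z => x ++ y ++ z)))).map String.toList).flatten := by
  rw [pcFlattenMapFlatMap, pcFlattenMapFlatMap]
  refine List.flatMap_congr ?_
  intro x _
  rw [pcFlattenMapFlatMap, pcFlattenMapFlatMap]
  refine List.flatMap_congr ?_
  intro y _
  induction s2 with
  | nil => simp
  | cons z t ih => simp [List.flatMap_cons, ih, String.toList_append]

theorem pcJoinNil (ls : List (List Char)) : PySem.Chars.join [] ls = ls.flatten := by
  induction ls with
  | nil => rw [PySem.Chars.join_nil]; rfl
  | cons p rest ih =>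
    cases rest with
    | nil => rw [PySem.Chars.join_singleton]; simp
    | cons q rest' =>
      rw [PySem.Chars.join_cons_cons]
      simp only [List.flatten_cons, List.append_nil]
      rw [ih]
      simp

theorem pcJoinToList (parts : List String) :
    (PySem.Str.join "" parts).toList = (parts.map String.toList).flatten := by
  rw [PySem.Str.toList_join, show ("" : String).toList = [] from rfl, pcJoinNil]

theorem pcFlattenLen (P : List String) (h : ∀ x ∈ P, x ≠ "") :
    P.length ≤ ((P.map String.toList).flatten).length := by
  induction P with
  | nil => simp
  | cons p t ih =>
    simp only [List.map_cons, List.flatten_cons, List.length_append, List.length_cons]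
    have hp : 1 ≤ p.toList.length := by
      have hne := h p (by simp)
      cases hq : p.toList with
      | nil => exact absurd (String.toList_eq_nil_iff.mp hq) hne
      | cons _ _ => simp
    have := ih (fun x hx => h x (by simp [hx]))
    omega

theorem pcMult_eq (x y z : Int) (hx : 0 < x) (hy : 0 < y) (hz : 0 < z) :
    pcMult [x, y, z, 3] = 3 * x * y * z := by
  simp only [pcMult, List.foldl_cons, List.foldl_nil, if_true]
  rw [mul_one, if_neg hx.ne', if_neg (mul_ne_zero hy.ne' hx.ne'),
      if_neg (mul_ne_zero hz.ne' (mul_ne_zero hy.ne' hx.ne'))]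
  ring

theorem pcLimitList (s0 s1 s2 : List String) :
    ((PySem.List.pyRange 0 ([s0, s1, s2].length : Int) 1).map
        (fun idx => ((PySem.List.pyGetD [s0, s1, s2] idx []).length : Int))) ++
      [(([s0, s1, s2].length : Nat) : Int)] =
    [(s0.length : Int), (s1.length : Int), (s2.length : Int), 3] := by
  have hr : PySem.List.pyRange 0 ([s0, s1, s2].length : Int) 1 = [0, 1, 2] := by
    simp; decide
  rw [hr]
  simp [PySem.List.pyGetD]

-- the heart of the equivalence: after resolving the sets argument, A's generator-based
-- computation equals B's product enumeration
theorem pcCore (s0 s1 s2 : List String) (h0 : s0 ≠ []) (h1 : s1 ≠ []) (h2 : s2 ≠ [])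
    (hne : ∀ x, (x ∈ s0 ∨ x ∈ s1 ∨ x ∈ s2) → x ≠ "")
    (len0 : Int)
    (hl : len0 < 0 ∨ len0 ≤ 3 * ((s0.length : Int) * (s1.length : Int) * (s2.length : Int))) :
    pcMain len0 [s0, s1, s2] = pbMain len0 [s0, s1, s2] := by
  have hn0 : 0 < s0.length := List.length_pos_of_ne_nil h0
  have hn1 : 0 < s1.length := List.length_pos_of_ne_nil h1
  have hn2 : 0 < s2.length := List.length_pos_of_ne_nil h2
  have hi0 : (0 : Int) < (s0.length : Int) := by exact_mod_cast hn0
  have hi1 : (0 : Int) < (s1.length : Int) := by exact_mod_cast hn1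
  have hi2 : (0 : Int) < (s2.length : Int) := by exact_mod_cast hn2
  unfold pcMain pbMain
  rw [if_pos (show ([s0, s1, s2] : List (List String)).length = 3 by rfl)]
  rw [pcLimitList s0 s1 s2, pcMult_eq _ _ _ hi0 hi1 hi2]
  set L : Int := 3 * (s0.length : Int) * (s1.length : Int) * (s2.length : Int) with hL
  simp only [gt_iff_lt]
  set len : Int := if len0 < 0 then L else len0 with hlen
  have hlenL : len ≤ L := by
    rcases hl with h | h
    · simp [hlen, h]
    · by_cases hc : len0 < 0
      · simp [hlen, hc]
      · simp [hlen, hc]; linarith [h]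
  have hlen0 : 0 ≤ len := by
    by_cases hc : len0 < 0
    · simp [hlen, hc, hL]; positivity
    · simp [hlen, hc]; omega
  rw [if_pos hlenL, if_pos hlenL]
  obtain ⟨m, heq, hm, hpre⟩ := pcLoop_spec s0 s1 s2 len (len.toNat + 1) 0 0 0 0 [] hn0 hn1 hn2
    (by
      have : (0 : Int) + 3 + 3 * (((s0.length : Int) - 1 - (0 : Nat)) * ((s1.length : Int) * (s2.length : Int))
          + ((s1.length : Int) - 1 - (0 : Nat)) * (s2.length : Int) + ((s2.length : Int) - 1 - (0 : Nat))) = L := by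
        rw [hL]; push_cast; ring
      rw [this]; exact hlenL)
    (by omega)
    (by push_cast; omega)
  rw [show ((0 : Nat) : Int) = (0 : Int) from rfl] at heq
  rw [heq, Option.elim]
  simp only [List.nil_append]
  set parts := pcStream s0 s1 s2 (0, 0, 0) m with hparts
  apply String.toList_inj.mp
  rw [PySem.Str.toList_slice, PySem.Str.toList_slice, PySem.Chars.slice_eq_listSlice,
      PySem.Chars.slice_eq_listSlice, PySem.List.slice_to _ hlen0, PySem.List.slice_to _ hlen0,
      pcJoinToList, pcJoinToList]
  obtain ⟨tl, htl⟩ := hpre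
  have hfull : ((parts.map String.toList).flatten) ++ ((tl.map String.toList).flatten) =
      ((s0.flatMap (fun x => s1.flatMap (fun y => s2.map (fun z => x ++ y ++ z)))).map String.toList).flatten := by
    rw [← pcCharsEq, ← pcSuffix_zero s0 s1 s2 hn0 hn1, ← htl]
    simp [List.flatten_append]
  have hplen : len.toNat ≤ ((parts.map String.toList).flatten).length := by
    have hmem : ∀ x ∈ parts, x ≠ "" := by
      intro x hx
      refine hne x (pcSuffix_mem s0 s1 s2 0 0 0 hn0 hn1 x ?_)
      rw [← htl]
      exact List.mem_append_left _ hx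
    have := pcFlattenLen parts hmem
    have hpl : parts.length = 3 * m := pcStream_length s0 s1 s2 m (0, 0, 0)
    omega
  rw [← hfull, List.take_append_of_le_length hplen]

theorem pcDefaults_eq : pcDefaultSets = pbDefaultSets := by decide

theorem pcProdCast (s0 s1 s2 : List String) :
    ((List.map List.length [s0, s1, s2]).prod : Int) =
      (s0.length : Int) * (s1.length : Int) * (s2.length : Int) := by
  simp only [List.map_cons, List.map_nil, List.prod_cons, List.prod_nil]
  push_cast
  ring

theorem pcDefaultCore (len0 : Int) (hl : len0 < 0 ∨ len0 ≤ 20280) :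
    pcMain len0 pcDefaultSets = pbMain len0 pcDefaultSets := by
  unfold pcDefaultSets
  apply pcCore
  · decide
  · decide
  · decide
  · have hA : ∀ x ∈ (List.range 26).map (fun i => String.ofList [Char.ofNat ('A'.toNat + i)]), x ≠ "" := by decide
    have ha : ∀ x ∈ (List.range 26).map (fun i => String.ofList [Char.ofNat ('a'.toNat + i)]), x ≠ "" := by decide
    have h0 : ∀ x ∈ (List.range 10).map (fun i => String.ofList [Char.ofNat ('0'.toNat + i)]), x ≠ "" := by decide
    intro x hx
    rcases hx with h | h | h
    · exact hA x h
    · exact ha x h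
    · exact h0 x h
  · rcases hl with h | h
    · exact Or.inl h
    · refine Or.inr ?_
      have e0 : (((List.range 26).map (fun i => String.ofList [Char.ofNat ('A'.toNat + i)])).length : Int) = 26 := by decide
      have e1 : (((List.range 26).map (fun i => String.ofList [Char.ofNat ('a'.toNat + i)])).length : Int) = 26 := by decide
      have e2 : (((List.range 10).map (fun i => String.ofList [Char.ofNat ('0'.toNat + i)])).length : Int) = 10 := by decide
      rw [e0, e1, e2]
      omega

theorem pattern_create_spec : Claim_equal_pattern_create := by
  intro len0 sets _dom hpre
  unfold Spec_pattern_create pattern_create pattern_create_alt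
  cases sets with
  | none =>
    simp only [Pre_pattern_create] at hpre
    show pcMain len0 pcDefaultSets = pbMain len0 (pbResolve none)
    rw [show pbResolve none = pbDefaultSets from rfl, ← pcDefaults_eq]
    exact pcDefaultCore len0 hpre
  | some s =>
    cases s with
    | nil =>
      simp only [Pre_pattern_create] at hpre
      show pcMain len0 pcDefaultSets = pbMain len0 (pbResolve (some []))
      rw [show pbResolve (some []) = pbDefaultSets from rfl, ← pcDefaults_eq]
      exact pcDefaultCore len0 hpre
    | cons t ts =>
      have hcond : ¬ ((some (t :: ts) : Option (List (List String))) = none ∨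
          (some (t :: ts) : Option (List (List String))) = some []) := by simp
      simp only [Pre_pattern_create, if_neg hcond, Option.getD_some] at hpre
      obtain ⟨hlen3, hall, hl⟩ := hpre
      obtain ⟨s0, s1, s2, heq3⟩ := List.length_eq_three.mp hlen3
      show pcMain len0 (t :: ts) = pbMain len0 (pbResolve (some (t :: ts)))
      rw [show pbResolve (some (t :: ts)) = t :: ts from rfl, heq3]
      rw [heq3] at hall hl
      apply pcCore
      · exact (hall s0 (by simp)).1
      · exact (hall s1 (by simp)).1
      · exact (hall s2 (by simp)).1
      · intro x hx
        rcases hx with h | h | h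
        · exact (hall s0 (by simp)).2 x h
        · exact (hall s1 (by simp)).2 x h
        · exact (hall s2 (by simp)).2 x h
      · rcases hl with h | h
        · exact Or.inl h
        · refine Or.inr ?_
          rw [pcProdCast s0 s1 s2] at h
          exact h

def pattern_create_raises : Claim_raises_pattern_create := by
  unfold Claim_raises_pattern_create
  constructor
  · intro len0 sets _dom hr hpre
    cases sets with
    | none => simp [Raises_pattern_create] at hr
    | some s =>
      have hsn : (some s : Option (List (List String))) ≠ none := by simp
      simp only [Raises_pattern_create, if_neg hsn, Option.getD_some] at hr
      obtain ⟨h3, ⟨t, ht, hte⟩, _⟩ := hr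
      have hnil : s ≠ [] := by
        intro h
        rw [h] at h3
        simp at h3
      have hcond : ¬ ((some s : Option (List (List String))) = none ∨
          (some s : Option (List (List String))) = some []) := by simp [hnil]
      simp only [Pre_pattern_create, if_neg hcond, Option.getD_some] at hpre
      exact (hpre.2.1 t ht).1 hte
  · refine ⟨by decide, ?_, by decide⟩
    decide
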